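-- pv_equiv track=rewrite | github.com/alu0101346908/SSI | P9/rsa.py | messageBlockToDecimalBlock
-- ===== SOURCE A (Python) =====
-- ALPHABET = 'ABCDEFGHIJKLMNOPQRSTUVWXYZ'
--
-- def messageBlockToDecimalBlock(messageBlock, j):
--   decimalBlock = []
--   for i in range(len(messageBlock)):
--     value = 0
--     exp = len(messageBlock[i]) - 1
--     for j in range(len(messageBlock[i])):
--       value += ALPHABET.find(messageBlock[i][j]) * pow(len(ALPHABET), exp)
--       exp -= 1
--     decimalBlock.append(value)
--   return decimalBlock
-- ===== SOURCE B (Python) =====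
-- ALPHABET = 'ABCDEFGHIJKLMNOPQRSTUVWXYZ'
-- _INDEX = {ch: i for i, ch in enumerate(ALPHABET)}
--
-- def messageBlockToDecimalBlock(messageBlock, j):
--     result = []
--     for block in messageBlock:
--         value = 0
--         for ch in block:
--             value = value * 26 + _INDEX.get(ch, -1)
--         result.append(value)
--     return result
-- ===== Notes on version B (the rewrite author's own statement) =====
-- stated objective: faster
-- what changed: Replaces the per-character ALPHABET.find scan and pow(26, exp) recomputation with Horner's rule (value = value*26 + digit) using a dict built once from enumerate(ALPHABET).
import Mathlib
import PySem

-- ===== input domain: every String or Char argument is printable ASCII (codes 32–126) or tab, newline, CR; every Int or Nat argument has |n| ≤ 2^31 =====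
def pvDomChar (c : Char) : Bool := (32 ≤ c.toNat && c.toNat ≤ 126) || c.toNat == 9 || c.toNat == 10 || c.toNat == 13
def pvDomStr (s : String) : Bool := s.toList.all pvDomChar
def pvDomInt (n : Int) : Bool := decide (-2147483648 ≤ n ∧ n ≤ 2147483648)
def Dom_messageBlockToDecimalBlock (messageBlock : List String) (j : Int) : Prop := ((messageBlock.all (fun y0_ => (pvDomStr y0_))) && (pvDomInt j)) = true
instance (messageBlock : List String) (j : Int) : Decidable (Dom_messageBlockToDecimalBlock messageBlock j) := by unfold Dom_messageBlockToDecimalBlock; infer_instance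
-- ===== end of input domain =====

-- B replaces the per-character ALPHABET.find + pow(26, exp) inner loop by Horner's rule with a
-- precomputed char→index dict: O(total chars) small-int work instead of an exponentiation per char.

-- ===== PORT A =====
def pvAlphabet : List Char := "ABCDEFGHIJKLMNOPQRSTUVWXYZ".toList

def messageBlockToDecimalBlock (messageBlock : List String) (j : Int) : List Int :=
  messageBlock.foldl (fun decimalBlock s =>
    let cs := s.toList
    let r :=
      (PySem.List.pyRange 0 (cs.length : Int) 1).foldl
        (fun (st : Int × Int) jj =>
          (st.1 + PySem.Chars.find pvAlphabet [PySem.List.pyGetD cs jj ' ']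
                    * (pvAlphabet.length : Int) ^ st.2.toNat,
           st.2 - 1))
        (0, (cs.length : Int) - 1)
    decimalBlock ++ [r.1]) []

-- ===== PORT B =====
def pvIdxDict : PySem.Dict Char Int :=
  (PySem.List.enumerate pvAlphabet).foldl (fun d p => d.insert p.2 p.1) PySem.Dict.empty

def messageBlockToDecimalBlock_alt (messageBlock : List String) (j : Int) : List Int :=
  messageBlock.foldl (fun result block =>
    result ++ [block.toList.foldl (fun value ch => value * 26 + pvIdxDict.getD ch (-1)) 0]) []

-- ===== PRECONDITION & SPEC =====
def Spec_messageBlockToDecimalBlock (messageBlock : List String) (j : Int) (out : List Int) : Prop := out = messageBlockToDecimalBlock_alt messageBlock j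
instance (messageBlock : List String) (j : Int) (out : List Int) : Decidable (Spec_messageBlockToDecimalBlock messageBlock j out) := by unfold Spec_messageBlockToDecimalBlock; infer_instance

-- ===== CLAIM (what is proved, stated in full; the proofs are below) =====
def Claim_equal_messageBlockToDecimalBlock : Prop := ∀ (messageBlock : List String) (j : Int), Dom_messageBlockToDecimalBlock messageBlock j → Spec_messageBlockToDecimalBlock messageBlock j (messageBlockToDecimalBlock messageBlock j)

-- ===== LEMMAS AND PROOFS =====

-- 'ALPHABET.find(c)' for a single character: first index of c, or -1.
theorem pv_find_cons (x : Char) (s : List Char) (c : Char) :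
    PySem.Chars.find (x :: s) [c] =
      if c = x then 0
      else if PySem.Chars.find s [c] = -1 then -1 else PySem.Chars.find s [c] + 1 := by
  by_cases hcx : c = x
  · subst hcx
    rw [if_pos rfl]
    have hinf : [c] <:+: c :: s := (List.singleton_infix_iff c (c :: s)).2 (List.mem_cons_self)
    have h0 : 0 ≤ PySem.Chars.find (c :: s) [c] := (PySem.Chars.find_nonneg_iff _ _).2 hinf
    obtain ⟨hpre, hmin⟩ := PySem.Chars.find_spec h0
    have hz : (PySem.Chars.find (c :: s) [c]).toNat = 0 := by
      by_contra h
      exact hmin 0 (Nat.pos_of_ne_zero h) (by simp)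
    have := Int.toNat_of_nonneg h0
    omega
  · simp only [if_neg hcx]
    by_cases hm : c ∈ s
    · have hfs0 : 0 ≤ PySem.Chars.find s [c] :=
        (PySem.Chars.find_nonneg_iff _ _).2 ((List.singleton_infix_iff c s).2 hm)
      have hne : PySem.Chars.find s [c] ≠ -1 := by omega
      simp only [if_neg hne]
      obtain ⟨hp, hmin⟩ := PySem.Chars.find_spec hfs0
      have hinf2 : [c] <:+: x :: s :=
        (List.singleton_infix_iff c (x :: s)).2 (List.mem_cons_of_mem _ hm)
      have h0' : 0 ≤ PySem.Chars.find (x :: s) [c] := (PySem.Chars.find_nonneg_iff _ _).2 hinf2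
      obtain ⟨hp', hmin'⟩ := PySem.Chars.find_spec h0'
      have hn1 : 1 ≤ (PySem.Chars.find (x :: s) [c]).toNat := by
        rcases Nat.eq_zero_or_pos (PySem.Chars.find (x :: s) [c]).toNat with h | h
        · rw [h] at hp'
          simp only [List.drop_zero, List.cons_prefix_cons] at hp'
          exact absurd hp'.1 hcx
        · exact h
      -- prefix at n in (x::s) is prefix at n-1 in s
      have hA : (PySem.Chars.find s [c]).toNat ≤ (PySem.Chars.find (x :: s) [c]).toNat - 1 := by
        by_contra h
        push Not at h
        apply hmin ((PySem.Chars.find (x :: s) [c]).toNat - 1) h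
        have := hp'
        rw [show (PySem.Chars.find (x :: s) [c]).toNat
              = ((PySem.Chars.find (x :: s) [c]).toNat - 1) + 1 by omega] at this
        rwa [List.drop_succ_cons] at this
      have hB : (PySem.Chars.find (x :: s) [c]).toNat ≤ (PySem.Chars.find s [c]).toNat + 1 := by
        by_contra h
        push Not at h
        apply hmin' ((PySem.Chars.find s [c]).toNat + 1) h
        rwa [List.drop_succ_cons]
      omega
    · have h1 : PySem.Chars.find s [c] = -1 :=
        (PySem.Chars.find_eq_neg_one_iff _ _).2 (fun h => hm ((List.singleton_infix_iff c s).1 h))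
      have h2 : PySem.Chars.find (x :: s) [c] = -1 :=
        (PySem.Chars.find_eq_neg_one_iff _ _).2 (fun h => by
          rcases List.mem_cons.1 ((List.singleton_infix_iff c (x :: s)).1 h) with h' | h'
          · exact hcx h'
          · exact hm h')
      simp [h1, h2]

theorem pv_find_singleton (s : List Char) (c : Char) :
    PySem.Chars.find s [c] = if c ∈ s then (s.idxOf c : Int) else -1 := by
  induction s with
  | nil =>
    simp only [List.not_mem_nil, if_false]
    exact (PySem.Chars.find_eq_neg_one_iff _ _).2 (by simp)
  | cons x s ih =>
    rw [pv_find_cons, ih]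
    by_cases hcx : c = x
    · subst hcx; simp [List.idxOf_cons_self]
    · by_cases hm : c ∈ s
      · simp only [hm, if_true, List.idxOf_cons_ne _ (fun h => hcx h.symm)]
        simp [hcx, hm]
      · simp [hcx, hm]

-- the dict built from enumerate(ALPHABET) looks up the same first index
theorem pv_dict_getD (xs : List Char) (hn : xs.Nodup) (c : Char) :
    ((PySem.List.enumerate xs).foldl (fun d p => d.insert p.2 p.1) PySem.Dict.empty).getD c (-1)
      = if c ∈ xs then (xs.idxOf c : Int) else -1 := by
  induction xs using List.reverseRecOn with
  | nil => simp [PySem.List.enumerate_nil]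
  | append_singleton xs x ih =>
    have hx : x ∉ xs := by simp [List.nodup_append] at hn; tauto
    have hn' : xs.Nodup := (List.nodup_append.1 hn).1
    rw [PySem.List.enumerate_append, List.foldl_append]
    simp only [PySem.List.enumerate_cons, PySem.List.enumerate_nil, List.foldl_cons,
      List.foldl_nil, zero_add]
    rw [PySem.Dict.getD_insert]
    rw [List.idxOf_append]
    by_cases hcx : c = x
    · subst hcx
      simp [hx, List.idxOf_cons_self]
    · simp only [if_neg hcx]
      rw [ih hn']
      by_cases hm : c ∈ xs
      · simp [hm]
      · simp [hm, hcx]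

theorem pv_lookup_eq (c : Char) :
    pvIdxDict.getD c (-1) = PySem.Chars.find pvAlphabet [c] := by
  unfold pvIdxDict
  rw [pv_dict_getD pvAlphabet (by decide) c, pv_find_singleton]

-- Horner step: running a Horner fold from a is running it from 0 plus a*26^len;
-- A's positional loop computes the Horner value
theorem pv_horner_shift (f : Char → Int) (cs : List Char) (a : Int) :
    cs.foldl (fun w c => w * 26 + f c) a
      = a * 26 ^ cs.length + cs.foldl (fun w c => w * 26 + f c) 0 := by
  induction cs generalizing a with
  | nil => simp
  | cons c cs ih =>
    simp only [List.foldl_cons, List.length_cons]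
    rw [ih (a * 26 + f c), ih (0 * 26 + f c)]
    ring

theorem pv_inner_eq (f : Char → Int) (cs : List Char) (v : Int) :
    (cs.foldl (fun (st : Int × Int) c => (st.1 + f c * 26 ^ st.2.toNat, st.2 - 1))
        (v, (cs.length : Int) - 1)).1
      = v + cs.foldl (fun w c => w * 26 + f c) 0 := by
  induction cs generalizing v with
  | nil => simp
  | cons c cs ih =>
    simp only [List.foldl_cons, List.length_cons]
    have h1 : ((cs.length : Int) + 1 - 1) = (cs.length : Int) := by ring
    have h2 : ((cs.length : Int)).toNat = cs.length := Int.toNat_natCast _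
    push_cast
    rw [h1, h2]
    rw [ih (v + f c * 26 ^ cs.length)]
    rw [pv_horner_shift f cs (0 + f c)]
    ring

-- ===== VERDICT (by name: the statement is the Claim_ definition above) =====
theorem messageBlockToDecimalBlock_spec : Claim_equal_messageBlockToDecimalBlock := by
  intro messageBlock j _
  unfold Spec_messageBlockToDecimalBlock messageBlockToDecimalBlock messageBlockToDecimalBlock_alt
  simp only [PySem.List.foldl_append_singleton_eq_map, List.nil_append]
  apply List.map_congr_left
  intro s _
  have h26 : ((pvAlphabet.length : Int)) = 26 := by decide
  rw [PySem.List.foldl_pyRange_zero_pyGetD' s.toList ' '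
        (fun (st : Int × Int) c =>
          (st.1 + PySem.Chars.find pvAlphabet [c] * (pvAlphabet.length : Int) ^ st.2.toNat,
           st.2 - 1))]
  simp only [h26]
  rw [pv_inner_eq (fun c => PySem.Chars.find pvAlphabet [c]) s.toList 0]
  simp only [pv_lookup_eq, zero_add]
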